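-- pv_equiv track=rewrite | github.com/c2997108/lastwasm | scripts/last-dotplot.py | get_seq_starts
-- ===== SOURCE A (Python) =====
-- def get_seq_starts(seq_pix, pix_tween_seqs, margin):
--     '''Get the start pixel for each sequence.'''
--     seq_starts = []
--     pix_tot = margin - pix_tween_seqs
--     for i in seq_pix:
--         pix_tot += pix_tween_seqs
--         seq_starts.append(pix_tot)
--         pix_tot += i
--     return seq_starts
-- ===== SOURCE B (Python) =====
-- def get_seq_starts(seq_pix, pix_tween_seqs, margin):
--     '''Get the start pixel for each sequence.'''
--     prefixes = [0]
--     for p in seq_pix: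
--         prefixes.append(prefixes[-1] + p)
--     return [margin + i * pix_tween_seqs + prefixes[i]
--             for i in range(len(seq_pix))]
-- ===== Notes on version B (the rewrite author's own statement) =====
-- stated objective: alternative
-- what changed: Replaces the single running-accumulator loop with a prefix-sum table built first, then a comprehension computing each start in closed form as margin + i*pix_tween_seqs + prefixes[i].
import Mathlib
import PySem

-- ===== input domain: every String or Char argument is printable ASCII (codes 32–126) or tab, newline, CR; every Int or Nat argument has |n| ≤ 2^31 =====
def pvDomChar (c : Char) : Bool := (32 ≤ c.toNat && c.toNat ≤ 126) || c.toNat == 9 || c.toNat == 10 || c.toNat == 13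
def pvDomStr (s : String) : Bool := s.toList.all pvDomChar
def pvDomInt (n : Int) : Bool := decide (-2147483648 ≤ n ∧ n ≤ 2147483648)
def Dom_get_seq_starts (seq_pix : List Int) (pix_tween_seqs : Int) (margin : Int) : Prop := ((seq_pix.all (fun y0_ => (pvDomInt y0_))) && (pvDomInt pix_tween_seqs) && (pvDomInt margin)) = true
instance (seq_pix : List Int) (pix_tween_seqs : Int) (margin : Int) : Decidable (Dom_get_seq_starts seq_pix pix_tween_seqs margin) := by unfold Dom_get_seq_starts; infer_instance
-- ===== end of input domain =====

-- B builds a prefix-sum table first and then emits each start as margin + i*tween + prefixes[i] (same O(n) cost, different decomposition).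


-- ===== PORT A =====
-- literal transliteration of A: one loop carrying (seq_starts, pix_tot)
def get_seq_starts (seq_pix : List Int) (pix_tween_seqs : Int) (margin : Int) : List Int :=
  (seq_pix.foldl
    (fun (st : List Int × Int) i =>
      let pix_tot := st.2 + pix_tween_seqs
      (st.1 ++ [pix_tot], pix_tot + i))
    ([], margin - pix_tween_seqs)).1

-- ===== PORT B =====
-- literal transliteration of B: build prefixes = [0, …running sums…], then map over range(len)
def get_seq_starts_alt (seq_pix : List Int) (pix_tween_seqs : Int) (margin : Int) : List Int :=
  let prefixes := seq_pix.foldl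
    (fun pre p => pre ++ [PySem.List.pyGetD pre (-1) 0 + p]) [0]
  (PySem.List.pyRange 0 (seq_pix.length : Int) 1).map
    (fun i => margin + i * pix_tween_seqs + PySem.List.pyGetD prefixes i 0)

-- ===== PRECONDITION & SPEC =====
def Spec_get_seq_starts (seq_pix : List Int) (pix_tween_seqs : Int) (margin : Int) (out : List Int) : Prop := out = get_seq_starts_alt seq_pix pix_tween_seqs margin
instance (seq_pix : List Int) (pix_tween_seqs : Int) (margin : Int) (out : List Int) : Decidable (Spec_get_seq_starts seq_pix pix_tween_seqs margin out) := by unfold Spec_get_seq_starts; infer_instance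

-- ===== CLAIM (what is proved, stated in full; the proofs are below) =====
def Claim_equal_get_seq_starts : Prop := ∀ (seq_pix : List Int) (pix_tween_seqs : Int) (margin : Int), Dom_get_seq_starts seq_pix pix_tween_seqs margin → Spec_get_seq_starts seq_pix pix_tween_seqs margin (get_seq_starts seq_pix pix_tween_seqs margin)

-- ===== LEMMAS AND PROOFS =====

-- the common recursive characterisation
def pvStarts : List Int → Int → Int → List Int
  | [], _, _ => []
  | x :: xs, t, m => m :: pvStarts xs t (m + x + t)

-- running sums of xs starting from a (what B's prefixes loop appends)
def pvScan (a : Int) : List Int → List Int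
  | [] => []
  | x :: xs => (a + x) :: pvScan (a + x) xs

theorem pvScan_length (a : Int) (xs : List Int) : (pvScan a xs).length = xs.length := by
  induction xs generalizing a with
  | nil => rfl
  | cons x xs ih => simp [pvScan, ih]

theorem pvScan_shift (a b : Int) (xs : List Int) :
    pvScan (a + b) xs = (pvScan b xs).map (a + ·) := by
  induction xs generalizing b with
  | nil => rfl
  | cons x xs ih => simp [pvScan, add_assoc, ih (b + x)]

-- B's prefixes foldl computes ys ++ [a] ++ pvScan a xs
theorem pvPrefixes_foldl (xs : List Int) (ys : List Int) (a : Int) :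
    xs.foldl (fun pre p => pre ++ [PySem.List.pyGetD pre (-1) 0 + p]) (ys ++ [a])
      = ys ++ [a] ++ pvScan a xs := by
  induction xs generalizing ys a with
  | nil => simp [pvScan]
  | cons x xs ih =>
    simp only [List.foldl_cons, PySem.List.pyGetD_neg_one_append_singleton]
    have := ih (ys ++ [a]) (a + x)
    simpa [pvScan, List.append_assoc] using this

-- A's foldl result with a nonempty accumulator
theorem pvA_foldl (xs : List Int) (t : Int) (acc : List Int) (p : Int) :
    (xs.foldl
      (fun (st : List Int × Int) i =>
        let pix_tot := st.2 + t
        (st.1 ++ [pix_tot], pix_tot + i)) (acc, p)).1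
      = acc ++ pvStarts xs t (p + t) := by
  induction xs generalizing acc p with
  | nil => simp [pvStarts]
  | cons x xs ih =>
    simp only [List.foldl_cons]
    have := ih (acc ++ [p + t]) (p + t + x)
    simp only [this, pvStarts, List.append_assoc, List.singleton_append]

theorem pvA_eq (xs : List Int) (t m : Int) : get_seq_starts xs t m = pvStarts xs t m := by
  unfold get_seq_starts
  have := pvA_foldl xs t [] (m - t)
  simpa using this

-- B's comprehension over the prefix table equals pvStarts
theorem pvB_main (t : Int) (xs : List Int) (m : Int) :
    (List.range xs.length).map
      (fun (k : Nat) => m + (k : Int) * t + PySem.List.pyGetD (0 :: pvScan 0 xs) ((k : Nat) : Int) 0)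
      = pvStarts xs t m := by
  induction xs generalizing m with
  | nil => simp [pvStarts]
  | cons x xs ih =>
    rw [List.length_cons, List.range_succ_eq_map]
    simp only [List.map_cons, List.map_map, pvStarts, List.cons.injEq]
    refine ⟨by simp [PySem.List.pyGetD], ?_⟩
    rw [← ih (m + x + t)]
    apply List.map_congr_left
    intro k hk
    have hk' : k < xs.length := List.mem_range.mp hk
    have hsc : pvScan 0 (x :: xs) = (0 :: pvScan 0 xs).map (x + ·) := by
      have h0 : pvScan (x + 0) xs = (pvScan 0 xs).map (x + ·) := pvScan_shift x 0 xs
      simp only [add_zero] at h0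
      simp [pvScan, h0]
    have h1 : PySem.List.pyGetD (0 :: pvScan 0 (x :: xs)) ((k + 1 : Nat) : Int) 0
        = x + PySem.List.pyGetD (0 :: pvScan 0 xs) ((k : Nat) : Int) 0 := by
      rw [hsc, PySem.List.pyGetD_natCast, PySem.List.pyGetD_natCast]
      have hlen2 : k < (0 :: pvScan 0 xs).length := by
        simp [pvScan_length]; omega
      have hlen1 : k < ((0 :: pvScan 0 xs).map (x + ·)).length := by
        simpa using hlen2
      rw [List.getD_cons_succ,
          List.getD_eq_getElem _ _ hlen1,
          List.getD_eq_getElem _ _ hlen2]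
      rw [List.getElem_map]
    simp only [Function.comp]
    push_cast
    push_cast at h1
    rw [h1]
    ring

theorem pvB_eq (xs : List Int) (t m : Int) : get_seq_starts_alt xs t m = pvStarts xs t m := by
  unfold get_seq_starts_alt
  have hpre : xs.foldl (fun pre p => pre ++ [PySem.List.pyGetD pre (-1) 0 + p]) [0]
      = 0 :: pvScan 0 xs := by
    simpa using pvPrefixes_foldl xs [] 0
  rw [hpre, PySem.List.pyRange_one]
  simp only [sub_zero, Int.toNat_natCast, List.map_map]
  rw [← pvB_main t xs m]
  apply List.map_congr_left
  intro k hk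
  simp [Function.comp]

-- ===== VERDICT (by name: the statement is the Claim_ definition above) =====
theorem get_seq_starts_spec : Claim_equal_get_seq_starts := by
  intro xs t m _
  unfold Spec_get_seq_starts
  rw [pvA_eq, pvB_eq]
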